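-- pv_equiv track=rewrite | github.com/gabozako/AlgoQueen | suy2on/Programmers/devPass/1.py | solution
-- ===== SOURCE A (Python) =====
-- def solution(bricks):
--     answer = []
--
--     for i in range(len(bricks)):
--         w = sum(bricks[:i + 1])
--         total = w
--         h = 0
--         clear = True
--         # 위층 쌓기
--         for j in range(i + 1, len(bricks)):
--             if total == w:
--                 total = 0
--                 h += 1
--             elif total > w:
--                 clear = False
--                 break
--             total += bricks[j]
--         # 마지막검사
--         if total == w and clear:
--             answer.append(h + 1)
--
--     return sorted(answer)
-- ===== SOURCE B (Python) =====
-- def _build(lo, vals):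
--     # segment-tree node over vals (absolute index range [lo, lo+len)): (a, b, max, left, right)
--     if len(vals) == 1:
--         return (lo, lo + 1, vals[0], None, None)
--     k = len(vals) // 2
--     l = _build(lo, vals[:k])
--     r = _build(lo + k, vals[k:])
--     m = l[2] if l[2] >= r[2] else r[2]
--     return (lo, lo + len(vals), m, l, r)
--
--
-- def _first_ge(node, lo, t):
--     # first absolute index >= lo whose value is >= t, or None
--     if node is None:
--         return None
--     a, b, mx, l, r = node
--     if b <= lo or mx < t:
--         return None
--     if l is None:
--         return a
--     res = _first_ge(l, lo, t)
--     return res if res is not None else _first_ge(r, lo, t)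
--
--
-- def solution(bricks):
--     n = len(bricks)
--     pref = []
--     s = 0
--     for x in bricks:
--         s += x
--         pref.append(s)
--     S = pref[n - 1] if n else 0
--     # vals[j] = pref[j] are exactly the running totals the tower check inspects
--     tree = _build(0, pref[: n - 1]) if n >= 2 else None
--     answer = []
--     for i in range(n):
--         w = pref[i]
--         t = w
--         h = 0
--         p = i
--         while True:
--             q = _first_ge(tree, p, t)
--             if q is None:
--                 if S == t:
--                     answer.append(h + 1)
--                 break
--             if pref[q] > t:
--                 break
--             h += 1
--             t += w
--             p = q + 1
--     answer.sort()
--     return answer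
-- ===== Notes on version B (the rewrite author's own statement) =====
-- stated objective: faster
-- what changed: B builds the running-total array once and a max segment tree over it, then for each base jumps directly to the next running total >= the current target (exact hit advances the target by the base width, overshoot fails), instead of A's per-base slice re-summation and element-by-element simulation.
import Mathlib
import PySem

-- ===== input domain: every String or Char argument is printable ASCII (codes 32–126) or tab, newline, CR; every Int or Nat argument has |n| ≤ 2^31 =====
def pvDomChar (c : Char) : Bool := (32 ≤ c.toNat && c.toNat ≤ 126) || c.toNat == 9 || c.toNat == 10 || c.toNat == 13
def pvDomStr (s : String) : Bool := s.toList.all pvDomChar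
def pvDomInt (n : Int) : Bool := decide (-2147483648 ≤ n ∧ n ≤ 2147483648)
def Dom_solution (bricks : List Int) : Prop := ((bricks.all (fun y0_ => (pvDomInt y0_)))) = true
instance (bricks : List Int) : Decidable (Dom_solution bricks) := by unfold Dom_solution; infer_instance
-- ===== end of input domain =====

-- B builds the running-total array once plus a max segment tree over it, and for each base
-- jumps to the next running total ≥ the current target instead of A's per-base element-by-element
-- simulation with slice re-summation (objective: faster).

-- ===== PORT A =====
def solution (bricks : List Int) : List Int :=
  let n : Int := bricks.length
  let answer := (PySem.List.pyRange 0 n 1).foldl (fun answer i =>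
    let w := (PySem.List.slice bricks none (some (i + 1))).sum
    let st := (PySem.List.pyRange (i + 1) n 1).foldl
      (fun (st : Int × Int × Bool) j =>
        if st.2.2 = false then st                                      -- after break
        else if st.1 = w then (0 + PySem.List.pyGetD bricks j 0, st.2.1 + 1, true)
        else if st.1 > w then (st.1, st.2.1, false)                    -- clear = False; break
        else (st.1 + PySem.List.pyGetD bricks j 0, st.2.1, true))
      (w, 0, true)
    if st.1 = w ∧ st.2.2 = true then answer ++ [st.2.1 + 1] else answer) []
  PySem.List.sorted answer (fun x => x) false

-- ===== PORT B =====
-- segment-tree node (Python tuple (a, b, max, left, right); leaves have no children)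
inductive STree where
  | leaf : Nat → Int → STree            -- a, value (b = a+1, max = value)
  | node : Nat → Nat → Int → STree → STree → STree   -- a, b, max, left, right
deriving Repr

def STree.mx : STree → Int
  | .leaf _ v => v
  | .node _ _ m _ _ => m

-- _build(lo, vals); Python only builds on non-empty slices, [] is unreachable (leaf lo 0)
def build (lo : Nat) (vals : List Int) : STree :=
  if _h : vals.length ≤ 1 then .leaf lo (vals.headD 0)
  else
    let k := vals.length / 2
    let l := build lo (vals.take k)
    let r := build (lo + k) (vals.drop k)
    .node lo (lo + vals.length) (if l.mx ≥ r.mx then l.mx else r.mx) l r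
termination_by vals.length
decreasing_by
  · simp only [List.length_take]; omega
  · simp only [List.length_drop]; omega

-- _first_ge on a tree node
def STree.firstGE : STree → Nat → Int → Option Nat
  | .leaf a v, lo, t => if a + 1 ≤ lo ∨ v < t then none else some a
  | .node _ b m l r, lo, t =>
      if b ≤ lo ∨ m < t then none
      else match l.firstGE lo t with
           | some res => some res
           | none => r.firstGE lo t

-- _first_ge with the None-tree case
def firstGEOpt : Option STree → Nat → Int → Option Nat
  | none, _, _ => none
  | some nd, lo, t => nd.firstGE lo t

-- the while-loop of B; fuel is a totality guard only (the loop advances p past the tree each turn)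
def loopB (pref : List Int) (tree : Option STree) (S w : Int) :
    Nat → Int → Int → Nat → List Int → List Int
  | 0, _, _, _, ans => ans
  | fuel + 1, t, h, p, ans =>
      match firstGEOpt tree p t with
      | none => if S = t then ans ++ [h + 1] else ans
      | some q =>
          if PySem.List.pyGetD pref (q : Int) 0 > t then ans
          else loopB pref tree S w fuel (t + w) (h + 1) (q + 1) ans

def solution_alt (bricks : List Int) : List Int :=
  let n : Int := bricks.length
  let pr := bricks.foldl (fun (st : List Int × Int) x => (st.1 ++ [st.2 + x], st.2 + x)) ([], 0)
  let pref := pr.1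
  let S : Int := if n ≠ 0 then PySem.List.pyGetD pref (n - 1) 0 else 0
  let tree : Option STree :=
    if 2 ≤ n then some (build 0 (PySem.List.slice pref none (some (n - 1)))) else none
  let answer := (PySem.List.pyRange 0 n 1).foldl (fun ans i =>
    let w := PySem.List.pyGetD pref i 0
    loopB pref tree S w (bricks.length + 1) w 0 i.toNat ans) []
  PySem.List.sorted answer (fun x => x) false

-- ===== PRECONDITION & SPEC =====
def Spec_solution (bricks : List Int) (out : List Int) : Prop := out = solution_alt bricks
instance (bricks : List Int) (out : List Int) : Decidable (Spec_solution bricks out) := by unfold Spec_solution; infer_instance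

-- ===== CLAIM (what is proved, stated in full; the proofs are below) =====
def Claim_equal_solution : Prop := ∀ (bricks : List Int), Dom_solution bricks → Spec_solution bricks (solution bricks)

-- ===== LEMMAS AND PROOFS =====

-- prefix sums starting AT s: psums s l = [s, s+l0, s+l0+l1, …] of length l.length
def psums (s : Int) : List Int → List Int
  | [] => []
  | x :: xs => s :: psums (s + x) xs

-- the values appended by B's prefix loop from running sum s
def cums (s : Int) : List Int → List Int
  | [] => []
  | x :: xs => (s + x) :: cums (s + x) xs

lemma buildPref (l : List Int) : ∀ (acc : List Int) (s : Int),
    l.foldl (fun (st : List Int × Int) x => (st.1 ++ [st.2 + x], st.2 + x)) (acc, s)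
      = (acc ++ cums s l, s + l.sum) := by
  induction l with
  | nil => intro acc s; simp [cums]
  | cons x xs ih =>
      intro acc s
      simp only [List.foldl_cons, cums, ih, List.sum_cons, List.append_assoc,
        List.cons_append, List.nil_append, Prod.mk.injEq]
      exact ⟨by simp, by ring⟩

lemma cons_cums (l : List Int) : ∀ s : Int, s :: cums s l = psums s l ++ [s + l.sum] := by
  induction l with
  | nil => intro s; simp [cums, psums]
  | cons x xs ih =>
      intro s
      simp only [cums, psums, List.cons_append, List.cons.injEq, true_and]
      rw [ih (s + x)]
      simp; ring

lemma length_psums (l : List Int) : ∀ s, (psums s l).length = l.length := by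
  induction l with
  | nil => intro s; simp [psums]
  | cons x xs ih => intro s; simp [psums, ih]

lemma drop_psums (l : List Int) : ∀ (k : Nat) (s : Int),
    (psums s l).drop k = psums (s + (l.take k).sum) (l.drop k) := by
  induction l with
  | nil => intro k s; simp [psums]
  | cons x xs ih =>
      intro k s
      cases k with
      | zero => simp [psums]
      | succ k =>
          simp only [psums, List.drop_succ_cons, List.take_succ_cons, List.sum_cons, ih]
          ring_nf

lemma pref_getD (l : List Int) : ∀ (k : Nat) (s : Int), k ≤ l.length →
    (psums s l ++ [s + l.sum]).getD k 0 = s + (l.take k).sum := by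
  induction l with
  | nil =>
      intro k s hk
      have : k = 0 := Nat.le_zero.mp (by simpa using hk)
      subst this; simp [psums]
  | cons x xs ih =>
      intro k s hk
      cases k with
      | zero => simp [psums]
      | succ k =>
          simp only [psums, List.cons_append, List.getD_cons_succ, List.take_succ_cons,
            List.sum_cons]
          have e : s + (x + xs.sum) = (s + x) + xs.sum := by ring
          rw [e, ih k (s + x) (by simpa using hk)]
          ring

-- A's inner loop body, as a function of the brick value
def stepA (w : Int) (st : Int × Int × Bool) (x : Int) : Int × Int × Bool :=
  if st.2.2 = false then st
  else if st.1 = w then (0 + x, st.2.1 + 1, true)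
  else if st.1 > w then (st.1, st.2.1, false)
  else (st.1 + x, st.2.1, true)

-- the target scan over prefix sums (proof-side reference form)
def stepB (w : Int) (st : Option (Int × Int)) (p : Int) : Option (Int × Int) :=
  match st with
  | none => none
  | some (target, h) =>
    if p = target then some (target + w, h + 1)
    else if p > target then none
    else some (target, h)

-- the per-base outcome as an Option, in scan form
def scanCont (w S : Int) (l : List Int) (t h : Int) : Option Int :=
  match l.foldl (stepB w) (some (t, h)) with
  | none => none
  | some (t', h') => if S = t' then some (h' + 1) else none

lemma stepA_frozen (w : Int) (l : List Int) : ∀ t h, l.foldl (stepA w) (t, h, false) = (t, h, false) := by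
  induction l with
  | nil => intro t h; rfl
  | cons x xs ih => intro t h; simpa [stepA] using ih t h

lemma stepB_none (w : Int) (l : List Int) : l.foldl (stepB w) none = none := by
  induction l with
  | nil => rfl
  | cons x xs ih => simpa [stepB] using ih

-- the core correspondence: A's simulation and the target scan decide the same option
lemma core (tail : List Int) : ∀ (w total h s S tgt : Int),
    s = total + h * w → tgt = (h + 1) * w → S = s + tail.sum →
    (match tail.foldl (stepA w) (total, h, true) with
     | (t1, h1, c1) => if t1 = w ∧ c1 = true then some (h1 + 1) else (none : Option Int))
    = (match (psums s tail).foldl (stepB w) (some (tgt, h)) with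
       | none => none
       | some (t, h') => if S = t then some (h' + 1) else none) := by
  induction tail with
  | nil =>
      intro w total h s S tgt hs htgt hS
      simp only [psums, List.foldl_nil, List.sum_nil, add_zero] at *
      have hexp : (h + 1) * w = h * w + w := by ring
      by_cases hc : total = w
      · have : S = tgt := by rw [hS, hs, htgt, hexp, hc]; ring
        simp [hc, this]
      · have : S ≠ tgt := by rw [hS, hs, htgt, hexp]; intro hq; apply hc; linarith
        simp [hc, this]
  | cons x xs ih =>
      intro w total h s S tgt hs htgt hS
      have hexp : (h + 1) * w = h * w + w := by ring
      simp only [psums, List.foldl_cons, List.sum_cons] at *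
      by_cases h1 : total = w
      · have hst : s = tgt := by rw [hs, htgt, hexp, h1]; ring
        have hA : stepA w (total, h, true) x = (0 + x, h + 1, true) := by
          simp [stepA, h1]
        have hB : stepB w (some (tgt, h)) s = some (tgt + w, h + 1) := by
          simp [stepB, hst]
        rw [hA, hB]
        have hx : (0 : Int) + x = x := by ring
        rw [hx]
        exact ih w x (h + 1) (s + x) S (tgt + w)
          (by rw [hs, h1]; ring) (by rw [htgt]; ring) (by rw [hS]; ring)
      · by_cases h2 : total > w
        · have hA : stepA w (total, h, true) x = (total, h, false) := by
            simp [stepA, h1, h2]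
          have hgt : s > tgt := by rw [hs, htgt, hexp]; linarith
          have hB : stepB w (some (tgt, h)) s = none := by
            simp [stepB, hgt, (by linarith : s ≠ tgt)]
          rw [hA, hB, stepA_frozen, stepB_none]
          simp
        · have hA : stepA w (total, h, true) x = (total + x, h, true) := by
            simp [stepA, h1, h2]
          have hne : s ≠ tgt := by rw [hs, htgt, hexp]; intro hq; apply h1; linarith
          have hngt : ¬ s > tgt := by rw [hs, htgt, hexp]; omega
          have hB : stepB w (some (tgt, h)) s = some (tgt, h) := by
            simp [stepB, hne, hngt]
          rw [hA, hB]
          exact ih w (total + x) h (s + x) S tgt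
            (by rw [hs]; ring) htgt (by rw [hS]; ring)

-- per base i, A's inner simulation decides the scan-form option
lemma optionA_eq (bricks : List Int) (i : Int) (h0 : 0 ≤ i) (_hn : i < (bricks.length : Int)) :
    (match (PySem.List.pyRange (i + 1) (bricks.length : Int) 1).foldl
        (fun (st : Int × Int × Bool) j =>
          if st.2.2 = false then st
          else if st.1 = (PySem.List.slice bricks none (some (i + 1))).sum then
            (0 + PySem.List.pyGetD bricks j 0, st.2.1 + 1, true)
          else if st.1 > (PySem.List.slice bricks none (some (i + 1))).sum then
            (st.1, st.2.1, false)
          else (st.1 + PySem.List.pyGetD bricks j 0, st.2.1, true))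
        ((PySem.List.slice bricks none (some (i + 1))).sum, 0, true) with
     | (t1, h1, c1) =>
        if t1 = (PySem.List.slice bricks none (some (i + 1))).sum ∧ c1 = true
        then some (h1 + 1) else (none : Option Int))
    = scanCont ((bricks.take (i + 1).toNat).sum) bricks.sum
        (psums ((bricks.take (i + 1).toNat).sum) (bricks.drop (i + 1).toNat))
        ((bricks.take (i + 1).toNat).sum) 0 := by
  set k : Nat := (i + 1).toNat with hk
  have hik : i + 1 = (k : Int) := by omega
  have hlam : (fun (st : Int × Int × Bool) j =>
          if st.2.2 = false then st
          else if st.1 = (PySem.List.slice bricks none (some (i + 1))).sum then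
            (0 + PySem.List.pyGetD bricks j 0, st.2.1 + 1, true)
          else if st.1 > (PySem.List.slice bricks none (some (i + 1))).sum then
            (st.1, st.2.1, false)
          else (st.1 + PySem.List.pyGetD bricks j 0, st.2.1, true))
      = (fun st j => stepA ((PySem.List.slice bricks none (some (i + 1))).sum) st
          (PySem.List.pyGetD bricks j 0)) := rfl
  have hW : (PySem.List.slice bricks none (some (i + 1))).sum = (bricks.take k).sum := by
    rw [hik, PySem.List.slice_to_natCast]
  have hcore := core (bricks.drop k) ((bricks.take k).sum) ((bricks.take k).sum) 0
      ((bricks.take k).sum) bricks.sum ((bricks.take k).sum)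
      (by ring) (by ring) (by rw [← List.sum_take_add_sum_drop bricks k])
  rw [hlam, hW]
  rw [PySem.List.foldl_pyRange_pyGetD' bricks 0 (stepA ((bricks.take k).sum))
      (((bricks.take k).sum), 0, true) (show (0 : Int) ≤ i + 1 by omega)]
  rw [← hk]
  simpa only [scanCont] using hcore

-- ---- B-side: the segment tree answers "first index ≥ p with value ≥ t" ----

-- linear reference: first absolute index ≥ p (list starts at absolute index lo) with value ≥ t
def findGE : List Int → Nat → Nat → Int → Option Nat
  | [], _, _, _ => none
  | v :: vs, lo, p, t => if p ≤ lo ∧ t ≤ v then some lo else findGE vs (lo + 1) p t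

-- linear reference with the position constraint already consumed
def fge : List Int → Nat → Int → Option Nat
  | [], _, _ => none
  | v :: vs, s, t => if t ≤ v then some s else fge vs (s + 1) t

lemma findGE_append (xs : List Int) : ∀ (ys : List Int) (lo p : Nat) (t : Int),
    findGE (xs ++ ys) lo p t
      = (match findGE xs lo p t with
         | some q => some q
         | none => findGE ys (lo + xs.length) p t) := by
  induction xs with
  | nil => intro ys lo p t; simp [findGE]
  | cons v vs ih =>
      intro ys lo p t
      simp only [List.cons_append, findGE, List.length_cons]
      by_cases h : p ≤ lo ∧ t ≤ v
      · simp [h]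
      · simp only [if_neg h]
        rw [ih]
        have : lo + 1 + vs.length = lo + (vs.length + 1) := by omega
        rw [this]

lemma findGE_none_hi (vs : List Int) : ∀ (lo p : Nat) (t : Int),
    lo + vs.length ≤ p → findGE vs lo p t = none := by
  induction vs with
  | nil => intro lo p t _; rfl
  | cons v vs ih =>
      intro lo p t h
      simp only [List.length_cons] at h
      simp only [findGE, if_neg (by omega : ¬ (p ≤ lo ∧ t ≤ v))]
      exact ih (lo + 1) p t (by omega)

lemma findGE_none_lt (vs : List Int) : ∀ (lo p : Nat) (t : Int),
    (∀ v ∈ vs, v < t) → findGE vs lo p t = none := by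
  induction vs with
  | nil => intro lo p t _; rfl
  | cons v vs ih =>
      intro lo p t h
      have hv : v < t := h v (by simp)
      have hcond : ¬ (p ≤ lo ∧ t ≤ v) := fun hc => absurd hc.2 (by omega)
      simp only [findGE, if_neg hcond]
      exact ih (lo + 1) p t (fun u hu => h u (by simp [hu]))

lemma build_eq_node (lo : Nat) (vs : List Int) (h : ¬ vs.length ≤ 1) :
    build lo vs = STree.node lo (lo + vs.length)
      (if (build lo (vs.take (vs.length / 2))).mx ≥ (build (lo + vs.length / 2) (vs.drop (vs.length / 2))).mx
       then (build lo (vs.take (vs.length / 2))).mx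
       else (build (lo + vs.length / 2) (vs.drop (vs.length / 2))).mx)
      (build lo (vs.take (vs.length / 2))) (build (lo + vs.length / 2) (vs.drop (vs.length / 2))) := by
  rw [build]
  rw [dif_neg h]

lemma build_mx_ge : ∀ (N : Nat) (vs : List Int), vs.length ≤ N → vs ≠ [] →
    ∀ (lo : Nat), ∀ v ∈ vs, v ≤ (build lo vs).mx := by
  intro N
  induction N with
  | zero => intro vs h hne; cases vs with
      | nil => exact absurd rfl hne
      | cons a l => simp at h
  | succ N ih =>
      intro vs hlen hne lo v hv
      by_cases h1 : vs.length ≤ 1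
      · obtain ⟨a, rfl⟩ : ∃ a, vs = [a] := by
          cases vs with
          | nil => exact absurd rfl hne
          | cons a l => cases l with
              | nil => exact ⟨a, rfl⟩
              | cons b m => simp at h1
        rw [build]
        rw [dif_pos h1]
        simp at hv
        simp [STree.mx, hv]
      · rw [build_eq_node lo vs h1]
        set k := vs.length / 2 with hk
        have hk1 : 1 ≤ k := by omega
        have hkl : k < vs.length := by omega
        have hTlen : (vs.take k).length ≤ N := by
          rw [List.length_take, Nat.min_eq_left hkl.le]; omega
        have hDlen : (vs.drop k).length ≤ N := by rw [List.length_drop]; omega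
        have hTne : vs.take k ≠ [] := by
          intro hc; have := congrArg List.length hc
          rw [List.length_take, Nat.min_eq_left hkl.le] at this; simp at this; omega
        have hDne : vs.drop k ≠ [] := by
          intro hc; have := congrArg List.length hc
          rw [List.length_drop] at this; simp at this; omega
        have hvm : v ∈ vs.take k ++ vs.drop k := by
          rw [List.take_append_drop]; exact hv
        set L := build lo (vs.take k) with hLdef
        set R := build (lo + k) (vs.drop k) with hRdef
        show v ≤ if L.mx ≥ R.mx then L.mx else R.mx
        rcases List.mem_append.mp hvm with hmem | hmem
        · have hle : v ≤ L.mx := by rw [hLdef]; exact ih (vs.take k) hTlen hTne lo v hmem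
          split_ifs with hmx <;> omega
        · have hle : v ≤ R.mx := by rw [hRdef]; exact ih (vs.drop k) hDlen hDne (lo + k) v hmem
          split_ifs with hmx <;> omega

lemma build_firstGE : ∀ (N : Nat) (vs : List Int), vs.length ≤ N → vs ≠ [] →
    ∀ (lo p : Nat) (t : Int), (build lo vs).firstGE p t = findGE vs lo p t := by
  intro N
  induction N with
  | zero => intro vs h hne; cases vs with
      | nil => exact absurd rfl hne
      | cons a l => simp at h
  | succ N ih =>
      intro vs hlen hne lo p t
      by_cases h1 : vs.length ≤ 1
      · obtain ⟨a, rfl⟩ : ∃ a, vs = [a] := by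
          cases vs with
          | nil => exact absurd rfl hne
          | cons a l => cases l with
              | nil => exact ⟨a, rfl⟩
              | cons b m => simp at h1
        rw [build]
        rw [dif_pos h1]
        simp only [List.headD_cons, STree.firstGE, findGE]
        by_cases hc : p ≤ lo ∧ t ≤ a
        · obtain ⟨hc1, hc2⟩ := hc
          rw [if_neg (show ¬ (lo + 1 ≤ p ∨ a < t) by omega), if_pos ⟨hc1, hc2⟩]
        · have hor : lo + 1 ≤ p ∨ a < t := by
            rcases not_and_or.mp hc with h' | h'
            · left; omega
            · right; omega
          rw [if_pos hor, if_neg hc]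
      · rw [build_eq_node lo vs h1]
        set k := vs.length / 2 with hk
        have hk1 : 1 ≤ k := by omega
        have hkl : k < vs.length := by omega
        have hTlen : (vs.take k).length ≤ N := by
          rw [List.length_take, Nat.min_eq_left hkl.le]; omega
        have hDlen : (vs.drop k).length ≤ N := by rw [List.length_drop]; omega
        have hTne : vs.take k ≠ [] := by
          intro hc; have := congrArg List.length hc
          rw [List.length_take, Nat.min_eq_left hkl.le] at this; simp at this; omega
        have hDne : vs.drop k ≠ [] := by
          intro hc; have := congrArg List.length hc
          rw [List.length_drop] at this; simp at this; omega
        set L := build lo (vs.take k) with hLdef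
        set R := build (lo + k) (vs.drop k) with hRdef
        show (if lo + vs.length ≤ p ∨ (if L.mx ≥ R.mx then L.mx else R.mx) < t then none
              else match L.firstGE p t with
                   | some res => some res
                   | none => R.firstGE p t) = findGE vs lo p t
        by_cases hp : lo + vs.length ≤ p ∨ (if L.mx ≥ R.mx then L.mx else R.mx) < t
        · rw [if_pos hp]
          rcases hp with hp | hp
          · exact (findGE_none_hi vs lo p t hp).symm
          · refine (findGE_none_lt vs lo p t ?_).symm
            intro v hv
            have hvm : v ∈ vs.take k ++ vs.drop k := by
              rw [List.take_append_drop]; exact hv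
            rcases List.mem_append.mp hvm with hmem | hmem
            · have hle : v ≤ L.mx := by
                rw [hLdef]; exact build_mx_ge N (vs.take k) hTlen hTne lo v hmem
              split_ifs at hp with hmx <;> omega
            · have hle : v ≤ R.mx := by
                rw [hRdef]; exact build_mx_ge N (vs.drop k) hDlen hDne (lo + k) v hmem
              split_ifs at hp with hmx <;> omega
        · rw [if_neg hp]
          have hL1 : L.firstGE p t = findGE (vs.take k) lo p t := by
            rw [hLdef]; exact ih (vs.take k) hTlen hTne lo p t
          have hR1 : R.firstGE p t = findGE (vs.drop k) (lo + k) p t := by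
            rw [hRdef]; exact ih (vs.drop k) hDlen hDne (lo + k) p t
          rw [hL1, hR1]
          conv_rhs => rw [show vs = vs.take k ++ vs.drop k from (List.take_append_drop k vs).symm]
          rw [findGE_append]
          have hlk : lo + (vs.take k).length = lo + k := by
            rw [List.length_take, Nat.min_eq_left hkl.le]
          rw [hlk]

lemma findGE_past (vs : List Int) : ∀ (lo p : Nat) (t : Int), p ≤ lo →
    findGE vs lo p t = fge vs lo t := by
  induction vs with
  | nil => intro lo p t _; rfl
  | cons v rest ih =>
      intro lo p t hp
      simp only [findGE, fge]
      by_cases hv : t ≤ v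
      · rw [if_pos ⟨hp, hv⟩, if_pos hv]
      · rw [if_neg (by tauto), if_neg hv]
        exact ih (lo + 1) p t (by omega)

lemma findGE_to_fge (vs : List Int) : ∀ (lo p : Nat) (t : Int), lo ≤ p →
    findGE vs lo p t = fge (vs.drop (p - lo)) p t := by
  induction vs with
  | nil => intro lo p t _; simp [findGE, fge]
  | cons v rest ih =>
      intro lo p t hlo
      by_cases heq : lo = p
      · subst heq
        simp only [Nat.sub_self, List.drop_zero]
        exact findGE_past (v :: rest) lo lo t le_rfl
      · have hlt : lo < p := by omega
        simp only [findGE, if_neg (by omega : ¬ (p ≤ lo ∧ t ≤ v))]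
        rw [ih (lo + 1) p t (by omega)]
        have : (v :: rest).drop (p - lo) = rest.drop (p - (lo + 1)) := by
          have : p - lo = (p - (lo + 1)) + 1 := by omega
          rw [this, List.drop_succ_cons]
        rw [this]

lemma fge_some (l : List Int) : ∀ (s : Nat) (t : Int) (q : Nat), fge l s t = some q →
    ∃ low v rest, l = low ++ v :: rest ∧ s + low.length = q ∧ (∀ u ∈ low, u < t) ∧ t ≤ v := by
  induction l with
  | nil => intro s t q h; simp [fge] at h
  | cons v rest ih =>
      intro s t q h
      simp only [fge] at h
      by_cases hv : t ≤ v
      · rw [if_pos hv] at h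
        obtain rfl : s = q := by injection h
        exact ⟨[], v, rest, rfl, by simp, by simp, hv⟩
      · rw [if_neg hv] at h
        obtain ⟨low, u, rst, hl, hq, hlow, hu⟩ := ih (s + 1) t q h
        exact ⟨v :: low, u, rst, by simp [hl], by simp; omega, by
          intro z hz
          rcases List.mem_cons.mp hz with rfl | hz
          · omega
          · exact hlow z hz, hu⟩

lemma fge_none (l : List Int) : ∀ (s : Nat) (t : Int), fge l s t = none →
    ∀ u ∈ l, u < t := by
  induction l with
  | nil => intro s t _ u hu; simp at hu
  | cons v rest ih =>
      intro s t h u hu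
      simp only [fge] at h
      by_cases hv : t ≤ v
      · rw [if_pos hv] at h; exact absurd h (by simp)
      · rw [if_neg hv] at h
        rcases List.mem_cons.mp hu with rfl | hu
        · omega
        · exact ih (s + 1) t h u hu

lemma stepB_skip (w : Int) (low : List Int) : ∀ (t h : Int), (∀ u ∈ low, u < t) →
    low.foldl (stepB w) (some (t, h)) = some (t, h) := by
  induction low with
  | nil => intro t h _; rfl
  | cons v rest ih =>
      intro t h hlt
      have hv : v < t := hlt v (by simp)
      simp only [List.foldl_cons, stepB, if_neg (by omega : ¬ v = t),
        if_neg (by omega : ¬ v > t)]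
      exact ih t h (fun u hu => hlt u (by simp [hu]))

-- the jump loop computes the scan-form option
lemma jump_scan (vals : List Int) (S w : Int) (tree : Option STree)
    (Htree : ∀ (p : Nat) (t : Int), firstGEOpt tree p t = fge (vals.drop p) p t) :
    ∀ (fuel : Nat) (l : List Int) (t h : Int) (p : Nat) (ans : List Int),
      vals.drop p = l → l.length < fuel →
      loopB (vals ++ [S]) tree S w fuel t h p ans
        = match scanCont w S l t h with
          | none => ans
          | some hh => ans ++ [hh] := by
  intro fuel
  induction fuel with
  | zero => intro l t h p ans _ hf; omega
  | succ fuel ih =>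
      intro l t h p ans hdrop hf
      simp only [loopB, Htree p t, hdrop]
      cases hq : fge l p t with
      | none =>
          have hall := fge_none l p t hq
          dsimp only
          simp only [scanCont, stepB_skip w l t h hall]
          split_ifs with hS <;> rfl
      | some q =>
          dsimp only
          obtain ⟨low, v, rest, hl, hql, hlow, hv⟩ := fge_some l p t q hq
          have hqlen : q < vals.length := by
            have h1 : l.length = vals.length - p := by rw [← hdrop]; simp
            have h2 : p ≤ vals.length := by
              by_contra hc
              have : vals.drop p = [] := List.drop_eq_nil_of_le (by omega)
              rw [hdrop, hl] at this; simp at this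
            have : low.length < l.length := by
              rw [hl]; simp only [List.length_append, List.length_cons]; omega
            omega
          have hgv : PySem.List.pyGetD (vals ++ [S]) (q : Int) 0 = v := by
            rw [PySem.List.pyGetD_of_nonneg _ _ (by positivity)]
            rw [Int.toNat_natCast]
            have h1 : (vals ++ [S]).getD q 0 = vals.getD q 0 := by
              simp only [List.getD_eq_getElem?_getD]
              rw [List.getElem?_append_left hqlen]
            rw [h1, List.getD_eq_getElem?_getD]
            have h2 : vals[q]? = (vals.drop p)[q - p]? := by
              rw [List.getElem?_drop]
              congr 1
              omega
            rw [h2, hdrop, hl]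
            have h3 : q - p = low.length := by omega
            rw [h3]
            rw [List.getElem?_append_right (le_refl low.length)]
            simp
          rw [hgv]
          by_cases hgt : v > t
          · rw [if_pos hgt]
            have hvne : v ≠ t := by omega
            simp only [scanCont, hl, List.foldl_append, stepB_skip w low t h hlow,
              List.foldl_cons, stepB, if_neg hvne, if_pos hgt, stepB_none]
          · rw [if_neg hgt]
            have hveq : v = t := by omega
            have hrest : vals.drop (q + 1) = rest := by
              have h1 : vals.drop (q + 1) = (vals.drop p).drop (q + 1 - p) := by
                rw [List.drop_drop]
                congr 1
                omega
              rw [h1, hdrop, hl]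
              have h2 : q + 1 - p = low.length + 1 := by omega
              rw [h2]
              rw [show low.length + 1 = (low ++ [v]).length by simp,
                  show low ++ v :: rest = (low ++ [v]) ++ rest by simp]
              exact List.drop_left
            rw [ih rest (t + w) (h + 1) (q + 1) ans hrest
              (by
                have : rest.length < l.length := by
                  rw [hl]; simp only [List.length_append, List.length_cons]; omega
                omega)]
            simp only [scanCont, hl, List.foldl_append, stepB_skip w low t h hlow,
              List.foldl_cons, stepB, if_pos hveq]

-- ===== VERDICT (by name: the statement is the Claim_ definition above) =====
-- pref computed by B's fold, in closed form
lemma prefB_eq (x : Int) (xs : List Int) :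
    ((x :: xs).foldl (fun (st : List Int × Int) y => (st.1 ++ [st.2 + y], st.2 + y))
        (([] : List Int), (0 : Int))).1 = psums x xs ++ [x + xs.sum] := by
  rw [buildPref]
  simp only [List.nil_append]
  have h1 : cums 0 (x :: xs) = x :: cums x xs := by simp [cums]
  rw [h1, cons_cums xs x]

lemma psums_ne_nil (x : Int) (xs : List Int) (h : xs ≠ []) : psums x xs ≠ [] := by
  intro hc
  have := congrArg List.length hc
  rw [length_psums] at this
  simp at this
  exact h this

lemma tree_char (x : Int) (xs : List Int) :
    ∀ (p : Nat) (t : Int),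
      firstGEOpt
        (if 2 ≤ ((x :: xs).length : Int) then
          some (build 0 (PySem.List.slice (psums x xs ++ [x + xs.sum]) none
            (some (((x :: xs).length : Int) - 1))))
         else none) p t
      = fge ((psums x xs).drop p) p t := by
  intro p t
  cases xs with
  | nil =>
      rw [if_neg (by simp)]
      simp [firstGEOpt, psums, fge]
  | cons y ys =>
      rw [if_pos (show (2:Int) ≤ ((x :: y :: ys).length : Int) by
        have h : (x :: y :: ys).length = ys.length + 2 := by simp
        rw [h]; push_cast; omega)]
      have hslice : PySem.List.slice (psums x (y :: ys) ++ [x + (y :: ys).sum]) none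
          (some (((x :: y :: ys).length : Int) - 1)) = psums x (y :: ys) := by
        have : ((x :: y :: ys).length : Int) - 1 = (((y :: ys).length : Nat) : Int) := by
          simp only [List.length_cons]; push_cast; omega
        rw [this, PySem.List.slice_to_natCast]
        rw [show (y :: ys).length = (psums x (y :: ys)).length from (length_psums (y :: ys) x).symm,
          List.take_left]
      rw [hslice]
      show (build 0 (psums x (y :: ys))).firstGE p t = fge ((psums x (y :: ys)).drop p) p t
      rw [build_firstGE (psums x (y :: ys)).length (psums x (y :: ys)) le_rfl
        (psums_ne_nil x (y :: ys) (by simp)) 0 p t]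
      rw [findGE_to_fge (psums x (y :: ys)) 0 p t (Nat.zero_le p)]
      simp

-- ===== VERDICT (by name: the statement is the Claim_ definition above) =====
theorem solution_spec : Claim_equal_solution := by
  intro bricks _
  show Spec_solution bricks (solution bricks)
  unfold Spec_solution
  cases bricks with
  | nil => rfl
  | cons x xs =>
      simp only [solution, solution_alt, prefB_eq]
      have hcond : ¬ ((((x :: xs).length : Nat) : Int) = 0) := by
        simp only [List.length_cons]; push_cast; omega
      rw [if_pos hcond]
      have hS : PySem.List.pyGetD (psums x xs ++ [x + xs.sum]) (((x :: xs).length : Int) - 1) 0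
          = x + xs.sum := by
        have h1 : ((x :: xs).length : Int) - 1 = ((xs.length : Nat) : Int) := by simp
        rw [h1, PySem.List.pyGetD_of_nonneg _ _ (by positivity), Int.toNat_natCast]
        rw [pref_getD xs xs.length x le_rfl]
        simp
      rw [hS]
      congr 1
      apply PySem.List.foldl_congr_mem
      intro ans i hi
      rw [PySem.List.mem_pyRange_one] at hi
      have h0 : 0 ≤ i := hi.1
      have hn : i < ((x :: xs).length : Int) := hi.2
      have hiNat : i.toNat ≤ xs.length := by simp at hn; omega
      have hi1 : (i + 1).toNat = i.toNat + 1 := by omega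
      -- the base width B reads from pref equals A's slice sum
      have hwB : PySem.List.pyGetD (psums x xs ++ [x + xs.sum]) i 0
          = ((x :: xs).take (i + 1).toNat).sum := by
        have hRHS : ((x :: xs).take (i + 1).toNat).sum = x + (xs.take i.toNat).sum := by
          rw [hi1]; simp
        rw [hRHS]
        rw [show i = ((i.toNat : Nat) : Int) by omega,
          PySem.List.pyGetD_of_nonneg _ _ (by positivity), Int.toNat_natCast]
        rw [pref_getD xs i.toNat x hiNat]
      -- the suffix B jumps over equals the prefix-sum list A's scan walks
      have hdrop : (psums x xs).drop i.toNat
          = psums (((x :: xs).take (i + 1).toNat).sum) ((x :: xs).drop (i + 1).toNat) := by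
        rw [drop_psums xs i.toNat x, hi1]
        simp
      have hjump := jump_scan (psums x xs) (x + xs.sum)
        (((x :: xs).take (i + 1).toNat).sum) _ (tree_char x xs)
        ((x :: xs).length + 1) ((psums x xs).drop i.toNat)
        (((x :: xs).take (i + 1).toNat).sum) 0 i.toNat ans rfl
        (by
          have h2 : ((psums x xs).drop i.toNat).length ≤ xs.length := by
            rw [List.length_drop, length_psums]; omega
          simp only [List.length_cons]
          omega)
      rw [hwB, hjump, hdrop]
      have hsum : x + xs.sum = (x :: xs).sum := by simp
      rw [hsum]
      rw [← optionA_eq (x :: xs) i h0 hn]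
      set st := (PySem.List.pyRange (i + 1) ((x :: xs).length : Int) 1).foldl
          (fun (st : Int × Int × Bool) j =>
            if st.2.2 = false then st
            else if st.1 = (PySem.List.slice (x :: xs) none (some (i + 1))).sum then
              (0 + PySem.List.pyGetD (x :: xs) j 0, st.2.1 + 1, true)
            else if st.1 > (PySem.List.slice (x :: xs) none (some (i + 1))).sum then
              (st.1, st.2.1, false)
            else (st.1 + PySem.List.pyGetD (x :: xs) j 0, st.2.1, true))
          ((PySem.List.slice (x :: xs) none (some (i + 1))).sum, 0, true) with hst
      obtain ⟨t1, h1, c1⟩ := st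
      by_cases hc : t1 = (PySem.List.slice (x :: xs) none (some (i + 1))).sum ∧ c1 = true
      · simp [hc]
      · simp [hc]
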